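-- pv_equiv track=rewrite | github.com/ManishShettigar253/Donor_Match_PyMySQL | blood_check.py | check_donation_eligibility
-- ===== SOURCE A (Python) =====
-- def check_donation_eligibility(dage, dweight, rgroup_label, dgroup_label, health_conditions):
--     compatibility_map = {
--         "A+": {"A+", "A-", "O+", "O-"},
--         "A-": {"A-", "O-"},
--         "B+": {"B+", "B-", "O+", "O-"},
--         "B-": {"B-", "O-"},
--         "AB+": {"A+", "A-", "B+", "B-", "AB+", "AB-", "O+", "O-"},
--         "AB-": {"A-", "B-", "AB-", "O-"},
--         "O+": {"O+", "O-"},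
--         "O-": {"O-"}
--     }
--
--     if not (18 <= dage <= 60 and dweight >= 45 and dgroup_label in compatibility_map.get(rgroup_label, set())):
--         return "Cannot Donate"
--
--     for condition, answer in health_conditions.items():
--         if answer:
--             return "Cannot Donate"
--     return "Can Donate"
-- ===== SOURCE B (Python) =====
-- def check_donation_eligibility(dage, dweight, rgroup_label, dgroup_label, health_conditions):
--     def parse(label):
--         abo, rh = label[:-1], label[-1:]
--         if abo in ("A", "B", "AB", "O") and rh in ("+", "-"):
--             return abo, rh
--         return None
--
--     def group_ok(r, d):
--         if r is None or d is None:
--             return False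
--         return (d[0] == "O" or r[0] == "AB" or d[0] == r[0]) and (d[1] == "-" or r[1] == "+")
--
--     ok = (
--         18 <= dage <= 60
--         and dweight >= 45
--         and group_ok(parse(rgroup_label), parse(dgroup_label))
--         and not any(health_conditions.values())
--     )
--     return "Can Donate" if ok else "Cannot Donate"
-- ===== Notes on version B (the rewrite author's own statement) =====
-- stated objective: simpler
-- what changed: B derives donor/recipient blood-group compatibility by parsing each label into an ABO part and an Rh sign and applying the two standard transfusion rules (O is the universal ABO donor, AB the universal ABO recipient, Rh- donates to anyone), instead of looking the pair up in A's hard-coded 8x8 table of sets.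
import Mathlib
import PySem

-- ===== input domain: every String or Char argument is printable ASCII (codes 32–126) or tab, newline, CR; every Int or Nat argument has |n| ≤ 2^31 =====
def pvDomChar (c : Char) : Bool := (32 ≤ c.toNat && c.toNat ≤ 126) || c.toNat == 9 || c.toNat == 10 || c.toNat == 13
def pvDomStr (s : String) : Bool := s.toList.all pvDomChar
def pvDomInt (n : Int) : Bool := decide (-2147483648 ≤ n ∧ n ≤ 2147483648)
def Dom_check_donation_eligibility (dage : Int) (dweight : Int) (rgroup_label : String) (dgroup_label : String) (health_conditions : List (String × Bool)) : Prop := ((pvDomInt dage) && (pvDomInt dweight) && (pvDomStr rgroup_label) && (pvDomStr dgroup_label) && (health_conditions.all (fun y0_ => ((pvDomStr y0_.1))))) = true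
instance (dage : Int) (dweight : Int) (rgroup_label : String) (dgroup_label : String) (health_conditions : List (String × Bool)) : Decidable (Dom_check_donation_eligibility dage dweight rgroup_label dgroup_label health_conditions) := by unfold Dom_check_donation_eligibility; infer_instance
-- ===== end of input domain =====

-- B replaces A's hard-coded 64-cell compatibility table by parsing each label into its
-- ABO part and Rh sign and applying the two compatibility rules (objective: simpler).

-- ===== PORT A =====
-- the literal dict-of-sets from A's source
def pvCompatibilityMap : PySem.Dict String (PySem.Set String) := PySem.Dict.ofList
  [("A+", PySem.Set.ofList ["A+", "A-", "O+", "O-"]),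
   ("A-", PySem.Set.ofList ["A-", "O-"]),
   ("B+", PySem.Set.ofList ["B+", "B-", "O+", "O-"]),
   ("B-", PySem.Set.ofList ["B-", "O-"]),
   ("AB+", PySem.Set.ofList ["A+", "A-", "B+", "B-", "AB+", "AB-", "O+", "O-"]),
   ("AB-", PySem.Set.ofList ["A-", "B-", "AB-", "O-"]),
   ("O+", PySem.Set.ofList ["O+", "O-"]),
   ("O-", PySem.Set.ofList ["O-"])]

-- the 'for condition, answer in health_conditions.items(): if answer: return …' loop
def pvAHealthLoop : List (String × Bool) → String
  | [] => "Can Donate"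
  | (_, answer) :: rest => if answer then "Cannot Donate" else pvAHealthLoop rest

def check_donation_eligibility (dage : Int) (dweight : Int) (rgroup_label : String) (dgroup_label : String) (health_conditions : List (String × Bool)) : String :=
  if !(decide (18 ≤ dage) && decide (dage ≤ 60) && decide (45 ≤ dweight) &&
       PySem.Set.contains (pvCompatibilityMap.getD rgroup_label PySem.Set.empty) dgroup_label) then
    "Cannot Donate"
  else pvAHealthLoop health_conditions

-- ===== PORT B =====
-- Source B's parse(label): (label[:-1], label[-1:]) if they are a recognised ABO part and Rh sign
def pvParseGroup (label : String) : Option (String × String) :=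
  let abo := PySem.Str.slice label none (some (-1))
  let rh := PySem.Str.slice label (some (-1)) none
  if (abo == "A" || abo == "B" || abo == "AB" || abo == "O") && (rh == "+" || rh == "-") then
    some (abo, rh)
  else none

-- Source B's group_ok(r, d): the two compatibility rules (O universal ABO donor, AB universal
-- ABO recipient, otherwise equal ABO; Rh- donates to anyone, Rh+ only to Rh+)
def pvGroupOk : Option (String × String) → Option (String × String) → Bool
  | some (rabo, rrh), some (dabo, drh) =>
    (dabo == "O" || rabo == "AB" || dabo == rabo) && (drh == "-" || rrh == "+")
  | _, _ => false

def check_donation_eligibility_alt (dage : Int) (dweight : Int) (rgroup_label : String) (dgroup_label : String) (health_conditions : List (String × Bool)) : String :=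
  let ok :=
    decide (18 ≤ dage) && decide (dage ≤ 60) && decide (45 ≤ dweight) &&
    pvGroupOk (pvParseGroup rgroup_label) (pvParseGroup dgroup_label) &&
    !(health_conditions.any (fun c => c.2))
  if ok then "Can Donate" else "Cannot Donate"

-- ===== PRECONDITION & SPEC =====
def Spec_check_donation_eligibility (dage : Int) (dweight : Int) (rgroup_label : String) (dgroup_label : String) (health_conditions : List (String × Bool)) (out : String) : Prop := out = check_donation_eligibility_alt dage dweight rgroup_label dgroup_label health_conditions
instance (dage : Int) (dweight : Int) (rgroup_label : String) (dgroup_label : String) (health_conditions : List (String × Bool)) (out : String) : Decidable (Spec_check_donation_eligibility dage dweight rgroup_label dgroup_label health_conditions out) := by unfold Spec_check_donation_eligibility; infer_instance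

-- ===== CLAIM (what is proved, stated in full; the proofs are below) =====
def Claim_equal_check_donation_eligibility : Prop := ∀ (dage : Int) (dweight : Int) (rgroup_label : String) (dgroup_label : String) (health_conditions : List (String × Bool)), Dom_check_donation_eligibility dage dweight rgroup_label dgroup_label health_conditions → Spec_check_donation_eligibility dage dweight rgroup_label dgroup_label health_conditions (check_donation_eligibility dage dweight rgroup_label dgroup_label health_conditions)

-- ===== LEMMAS AND PROOFS =====

-- A's health loop is a Boolean 'any' over the answers
lemma pvAHealthLoop_eq (hc : List (String × Bool)) :
    pvAHealthLoop hc = if hc.any (fun c => c.2) then "Cannot Donate" else "Can Donate" := by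
  induction hc with
  | nil => rfl
  | cons p rest ih =>
    obtain ⟨c, a⟩ := p
    cases a
    · exact ih.trans rfl
    · rfl

def pvLabels8 : List String := ["A+", "A-", "B+", "B-", "AB+", "AB-", "O+", "O-"]

-- if parse succeeds the label is one of the eight recognised group labels
lemma pvParseGroup_some_mem (s : String) (h : (pvParseGroup s).isSome) : s ∈ pvLabels8 := by
  simp only [pvParseGroup] at h
  split at h
  case isTrue hc =>
    have hsplit : s.toList = (PySem.Str.slice s none (some (-1))).toList ++
        (PySem.Str.slice s (some (-1)) none).toList := by
      rw [PySem.Str.slice_to_neg_one]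
      have h2 : (PySem.Str.slice s (some (-1)) none).toList = s.toList.drop (s.toList.length - 1) := by
        simp [PySem.Str.slice, PySem.List.slice_from_neg_one]
      rw [h2, List.dropLast_eq_take, List.take_append_drop]
    obtain ⟨ha, hr⟩ := (Bool.and_eq_true _ _) ▸ hc
    have ha' : PySem.Str.slice s none (some (-1)) = "A" ∨ PySem.Str.slice s none (some (-1)) = "B" ∨
        PySem.Str.slice s none (some (-1)) = "AB" ∨ PySem.Str.slice s none (some (-1)) = "O" := by
      rcases (Bool.or_eq_true _ _) ▸ ha with h1 | h1
      · rcases (Bool.or_eq_true _ _) ▸ h1 with h2 | h2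
        · rcases (Bool.or_eq_true _ _) ▸ h2 with h3 | h3
          · exact Or.inl (eq_of_beq h3)
          · exact Or.inr (Or.inl (eq_of_beq h3))
        · exact Or.inr (Or.inr (Or.inl (eq_of_beq h2)))
      · exact Or.inr (Or.inr (Or.inr (eq_of_beq h1)))
    have hr' : PySem.Str.slice s (some (-1)) none = "+" ∨ PySem.Str.slice s (some (-1)) none = "-" := by
      rcases (Bool.or_eq_true _ _) ▸ hr with h1 | h1
      · exact Or.inl (eq_of_beq h1)
      · exact Or.inr (eq_of_beq h1)
    rcases ha' with h1 | h1 | h1 | h1 <;> rcases hr' with h2 | h2 <;>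
      · rw [h1, h2] at hsplit
        simp only [pvLabels8, List.mem_cons, List.not_mem_nil, or_false, ← String.toList_inj, hsplit]
        decide
  case isFalse => simp at h

lemma pvParseGroup_none_of_not_mem (s : String) (h : s ∉ pvLabels8) : pvParseGroup s = none := by
  cases hp : pvParseGroup s with
  | none => rfl
  | some v => exact absurd (pvParseGroup_some_mem s (by simp [hp])) h

lemma pvGroupOk_none_left (d : Option (String × String)) : pvGroupOk none d = false := by
  cases d with
  | none => rfl
  | some v => obtain ⟨a, b⟩ := v; rfl

lemma pvGroupOk_none_right (r : Option (String × String)) : pvGroupOk r none = false := by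
  cases r with
  | none => rfl
  | some v => obtain ⟨a, b⟩ := v; rfl

-- an unrecognised recipient label falls to the .get default: the empty set
lemma pvGetD_empty (r : String) (h : r ∉ pvLabels8) :
    pvCompatibilityMap.getD r PySem.Set.empty = PySem.Set.empty := by
  have g1 : r ≠ "A+" := fun he => h (by simp [he, pvLabels8])
  have g2 : r ≠ "A-" := fun he => h (by simp [he, pvLabels8])
  have g3 : r ≠ "B+" := fun he => h (by simp [he, pvLabels8])
  have g4 : r ≠ "B-" := fun he => h (by simp [he, pvLabels8])
  have g5 : r ≠ "AB+" := fun he => h (by simp [he, pvLabels8])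
  have g6 : r ≠ "AB-" := fun he => h (by simp [he, pvLabels8])
  have g7 : r ≠ "O+" := fun he => h (by simp [he, pvLabels8])
  have g8 : r ≠ "O-" := fun he => h (by simp [he, pvLabels8])
  rw [(by decide : pvCompatibilityMap = PySem.Dict.mk
    [("A+", (["A+", "A-", "O+", "O-"] : List String)), ("A-", ["A-", "O-"]),
     ("B+", ["B+", "B-", "O+", "O-"]), ("B-", ["B-", "O-"]),
     ("AB+", ["A+", "A-", "B+", "B-", "AB+", "AB-", "O+", "O-"]),
     ("AB-", ["A-", "B-", "AB-", "O-"]), ("O+", ["O+", "O-"]), ("O-", ["O-"])])]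
  simp [PySem.Dict.getD, PySem.Dict.get?,
    Ne.symm g1, Ne.symm g2, Ne.symm g3, Ne.symm g4, Ne.symm g5, Ne.symm g6, Ne.symm g7, Ne.symm g8]

-- every entry of every compatibility set is itself a recognised label
lemma pvValues_sub (r : String) (hr : r ∈ pvLabels8) :
    (pvCompatibilityMap.getD r PySem.Set.empty).all (pvLabels8.contains ·) = true := by
  fin_cases hr <;> decide

-- A's table lookup agrees with B's rule computation on every pair of strings
lemma pvGroup_eq (r d : String) :
    PySem.Set.contains (pvCompatibilityMap.getD r PySem.Set.empty) d =
      pvGroupOk (pvParseGroup r) (pvParseGroup d) := by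
  by_cases hr : r ∈ pvLabels8
  · by_cases hd : d ∈ pvLabels8
    · fin_cases hr <;> fin_cases hd <;> decide
    · rw [pvParseGroup_none_of_not_mem d hd, pvGroupOk_none_right]
      cases hc : PySem.Set.contains (pvCompatibilityMap.getD r PySem.Set.empty) d with
      | false => rfl
      | true =>
        exfalso
        have hmem : d ∈ pvCompatibilityMap.getD r PySem.Set.empty := by
          simpa [PySem.Set.contains] using hc
        have := List.all_eq_true.mp (pvValues_sub r hr) d hmem
        exact hd (by simpa using this)
  · rw [pvParseGroup_none_of_not_mem r hr, pvGroupOk_none_left, pvGetD_empty r hr]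
    rfl

-- ===== VERDICT (by name: the statement is the Claim_ definition above) =====
theorem check_donation_eligibility_spec : Claim_equal_check_donation_eligibility := by
  intro dage dweight rgroup_label dgroup_label health_conditions _
  unfold Spec_check_donation_eligibility
  simp only [check_donation_eligibility, check_donation_eligibility_alt]
  rw [pvGroup_eq, pvAHealthLoop_eq]
  generalize decide (18 ≤ dage) = b1
  generalize decide (dage ≤ 60) = b2
  generalize decide (45 ≤ dweight) = b3
  generalize pvGroupOk (pvParseGroup rgroup_label) (pvParseGroup dgroup_label) = b4
  generalize health_conditions.any (fun c => c.2) = b5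
  cases b1 <;> cases b2 <;> cases b3 <;> cases b4 <;> cases b5 <;> rfl
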